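-- pv_equiv track=rewrite | github.com/dandavison/misc-python | uber_1.py | verify_results
-- ===== SOURCE A (Python) =====
-- def verify_results(results):
--     curr_idx = -1
--     for id, is_valid, order_idx in sorted(results):
--         if not is_valid:
--             return False
--         elif order_idx < curr_idx:
--             return False
--         else:
--             curr_idx = order_idx
--     return True
-- ===== SOURCE B (Python) =====
-- def verify_results(results):
--     if any(not is_valid for _, is_valid, _ in results):
--         return False
--     return all(x[2] <= y[2] for x in results for y in results if x[0] < y[0])
-- ===== Notes on version B (the rewrite author's own statement) =====
-- stated objective: alternative
-- what changed: B drops the sort entirely: it checks validity with one any() pass and then verifies the defining condition directly as a brute-force pairwise check (every pair with a smaller id must have an order index at most the larger id's), instead of A's sort followed by a fused early-returning scan with a curr_idx accumulator; this trades A's O(n log n) for a sort-free O(n^2) check.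
-- intended difference: On inputs whose triples are all valid and whose order indices are non-decreasing across increasing ids but include an order index below -1, A returns False (its curr_idx sentinel -1 wrongly rejects order indices below -1) while B returns True, which is the intended value since the order indices are non-decreasing in sorted order. — e.g. on verify_results([(0, true, -2)]): A returns false, B returns true
import Mathlib
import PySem

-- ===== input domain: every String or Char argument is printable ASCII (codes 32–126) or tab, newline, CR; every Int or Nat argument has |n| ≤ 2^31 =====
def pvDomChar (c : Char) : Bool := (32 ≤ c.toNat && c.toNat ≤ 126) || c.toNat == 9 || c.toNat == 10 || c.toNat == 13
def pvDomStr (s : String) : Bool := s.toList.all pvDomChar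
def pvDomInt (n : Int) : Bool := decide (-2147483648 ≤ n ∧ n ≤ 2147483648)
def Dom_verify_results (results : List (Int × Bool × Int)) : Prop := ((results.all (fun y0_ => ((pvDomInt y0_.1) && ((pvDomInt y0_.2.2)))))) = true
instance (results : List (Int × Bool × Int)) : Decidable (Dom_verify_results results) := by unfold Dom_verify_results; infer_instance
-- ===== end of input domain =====

-- B drops the sort: a validity pass plus a brute-force pairwise check (smaller id ⇒ order index no
-- larger) replaces A's sort-then-fused-scan with its curr_idx = -1 sentinel; on all-valid inputs
-- whose order indices are non-decreasing across ids but dip below -1, B returns the intended True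
-- where A returns False.


-- Python's sorted(results) on (int, bool, int) triples compares tuples lexicographically with
-- False < True; on the domain (|id|, |order_idx| ≤ 2^31) this is exactly a stable sort by the
-- injective packed key below (shifts 2^66 = 73786976294838206464 and 2^33 = 8589934592 keep the
-- three fields from interfering).
def pyKey (r : Int × Bool × Int) : Int :=
  r.1 * 73786976294838206464 + (if r.2.1 then 8589934592 else 0) + r.2.2

def pySortedResults (results : List (Int × Bool × Int)) : List (Int × Bool × Int) :=
  PySem.List.sorted results pyKey false

-- ===== PORT A =====
-- the for-loop of A, carrying curr_idx
def verifyLoopA (curr : Int) : List (Int × Bool × Int) → Bool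
  | [] => true
  | (_, is_valid, order_idx) :: t =>
      if !is_valid then false
      else if order_idx < curr then false
      else verifyLoopA order_idx t

def verify_results (results : List (Int × Bool × Int)) : Bool :=
  verifyLoopA (-1) (pySortedResults results)

-- ===== PORT B =====
-- Source B: an any() pass over the validity flags, then the brute-force nested-generator all()
-- (the 'if x[0] < y[0]' filter becomes the implication ¬(x.1 < y.1) || x.2.2 ≤ y.2.2)
def verify_results_alt (results : List (Int × Bool × Int)) : Bool :=
  if results.any (fun r => !r.2.1) then false
  else results.all (fun x => results.all (fun y => !(decide (x.1 < y.1)) || decide (x.2.2 ≤ y.2.2)))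

-- ===== PRECONDITION & SPEC =====
-- On inputs whose triples are all valid and whose order indices are non-decreasing across
-- increasing ids but include an order index below -1, A returns False (its curr_idx sentinel -1
-- wrongly rejects order indices below -1) while B returns True, the intended value since the order
-- indices are non-decreasing in sorted order.
def D_verify_results (results : List (Int × Bool × Int)) : Prop :=
  (∀ r ∈ results, r.2.1 = true) ∧
  (∀ x ∈ results, ∀ y ∈ results, x.1 < y.1 → x.2.2 ≤ y.2.2) ∧
  (∃ r ∈ results, r.2.2 < -1)
instance (results : List (Int × Bool × Int)) : Decidable (D_verify_results results) := by
  unfold D_verify_results; infer_instance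

def Spec_verify_results (results : List (Int × Bool × Int)) (out : Bool) : Prop :=
  ¬ D_verify_results results → out = verify_results_alt results
instance (results : List (Int × Bool × Int)) (out : Bool) : Decidable (Spec_verify_results results out) := by
  unfold Spec_verify_results; infer_instance

def pvDiffWitness_verify_results : (List (Int × Bool × Int)) := [(0, true, -2)]
def pvDiffWitnessOut_verify_results : Bool × Bool := (false, true)

-- ===== CLAIM (what is proved, stated in full; the proofs are below) =====
def Claim_unchanged_verify_results : Prop := ∀ (results : List (Int × Bool × Int)), Dom_verify_results results → Spec_verify_results results (verify_results results)
def Claim_changed_verify_results : Prop := Dom_verify_results (pvDiffWitness_verify_results) ∧ D_verify_results (pvDiffWitness_verify_results) ∧ verify_results (pvDiffWitness_verify_results) = pvDiffWitnessOut_verify_results.1 ∧ verify_results_alt (pvDiffWitness_verify_results) = pvDiffWitnessOut_verify_results.2 ∧ pvDiffWitnessOut_verify_results.1 ≠ pvDiffWitnessOut_verify_results.2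
def Claim_exact_verify_results : Prop := ∀ (results : List (Int × Bool × Int)), Dom_verify_results results → D_verify_results results → verify_results results ≠ verify_results_alt results

-- ===== LEMMAS AND PROOFS =====

-- A's adjacent-pair condition along a list of order indices (for characterising A's loop)
def zipChain (l : List Int) : Bool := (l.zip (l.drop 1)).all (fun p => decide (p.1 ≤ p.2))

-- first order index bound, the only place A's curr seed matters
def headOk (c : Int) : List (Int × Bool × Int) → Bool
  | [] => true
  | (_, _, o) :: _ => decide (c ≤ o)

lemma zipChain_cons (o : Int) (l : List Int) :
    zipChain (o :: l) = ((match l with | [] => true | o2 :: _ => decide (o ≤ o2)) && zipChain l) := by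
  cases l with
  | nil => rfl
  | cons o2 t => simp [zipChain]

lemma zipChain_eq_pairwise (l : List Int) : zipChain l = true ↔ l.Pairwise (· ≤ ·) := by
  induction l with
  | nil => simp [zipChain]
  | cons o t ih =>
      rw [zipChain_cons]
      cases t with
      | nil => simp [zipChain]
      | cons o2 t2 =>
          rw [Bool.and_eq_true, decide_eq_true_eq, ih,
            List.pairwise_cons (l := o2 :: t2), List.pairwise_cons (l := t2)]
          constructor
          · rintro ⟨h1, h2, h3⟩
            refine ⟨?_, h2, h3⟩
            intro a ha
            rcases List.mem_cons.mp ha with rfl | ha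
            · exact h1
            · exact le_trans h1 (h2 a ha)
          · rintro ⟨h1, h2, h3⟩
            exact ⟨h1 o2 (List.mem_cons_self), h2, h3⟩

-- characterisation of A's fused loop: valid flags, the chain condition, and the head bound
lemma verifyLoopA_eq (c : Int) (s : List (Int × Bool × Int)) :
    verifyLoopA c s = (s.all (fun r => r.2.1) && zipChain (s.map (fun r => r.2.2)) && headOk c s) := by
  induction s generalizing c with
  | nil => rfl
  | cons x t ih =>
      obtain ⟨i, v, o⟩ := x
      cases v with
      | false => simp [verifyLoopA]
      | true =>
          by_cases hoc : o < c
          · simp [verifyLoopA, hoc, headOk, show ¬ c ≤ o by omega]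
          · simp only [verifyLoopA, Bool.not_true, Bool.false_eq_true, if_false,
              if_neg hoc, ih o, List.all_cons, List.map_cons, zipChain_cons, headOk]
            cases t with
            | nil => simp [zipChain, show c ≤ o by omega]
            | cons y t2 =>
                obtain ⟨i2, v2, o2⟩ := y
                simp only [List.map_cons, List.all_cons]
                by_cases h2 : o ≤ o2 <;> by_cases hc : c ≤ o <;>
                  simp [h2, hc] <;> omega

-- characterisation of B: all valid, and the raw pairwise condition over the unsorted input
lemma alt_eq_true_iff (results : List (Int × Bool × Int)) :
    verify_results_alt results = true ↔
      ((∀ r ∈ results, r.2.1 = true) ∧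
        ∀ x ∈ results, ∀ y ∈ results, x.1 < y.1 → x.2.2 ≤ y.2.2) := by
  unfold verify_results_alt
  by_cases hv : ∀ r ∈ results, r.2.1 = true
  · have : results.any (fun r => !r.2.1) = false := by
      simp only [List.any_eq_false, Bool.not_eq_true']
      intro r hr
      simp [hv r hr]
    rw [this]
    simp only [Bool.false_eq_true, if_false, List.all_eq_true]
    constructor
    · intro h
      refine ⟨hv, fun x hx y hy hxy => ?_⟩
      have := h x hx y hy
      simp only [Bool.or_eq_true, Bool.not_eq_eq_eq_not, Bool.not_true,
        decide_eq_false_iff_not, decide_eq_true_eq] at this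
      rcases this with h' | h'
      · exact absurd hxy h'
      · exact h'
    · rintro ⟨_, hraw⟩ x hx y hy
      by_cases hxy : x.1 < y.1
      · simp [hxy, hraw x hx y hy hxy]
      · simp [hxy]
  · have : results.any (fun r => !r.2.1) = true := by
      rw [not_forall] at hv
      simp only [not_forall, exists_prop] at hv
      obtain ⟨r, hr, hrv⟩ := hv
      exact List.any_eq_true.mpr ⟨r, hr, by simp [hrv]⟩
    rw [this]
    simp only [if_true]
    exact iff_of_false (by simp) (fun h => hv h.1)

lemma mem_pySorted (results : List (Int × Bool × Int)) (r : Int × Bool × Int) :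
    r ∈ pySortedResults results ↔ r ∈ results := by
  unfold pySortedResults; exact PySem.List.mem_sorted results pyKey false r

lemma domBounds (results : List (Int × Bool × Int)) (hDom : Dom_verify_results results)
    (r : Int × Bool × Int) (hr : r ∈ results) :
    -2147483648 ≤ r.1 ∧ r.1 ≤ 2147483648 ∧ -2147483648 ≤ r.2.2 ∧ r.2.2 ≤ 2147483648 := by
  unfold Dom_verify_results at hDom
  have := List.all_eq_true.mp hDom r hr
  simp [pvDomInt] at this
  exact ⟨this.1.1, this.1.2, this.2.1, this.2.2⟩

-- within the domain bounds, the packed key is strictly monotone in the first component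
lemma key_lt_of_fst_lt (a b : Int × Bool × Int)
    (ha1 : -2147483648 ≤ a.1 ∧ a.1 ≤ 2147483648 ∧ -2147483648 ≤ a.2.2 ∧ a.2.2 ≤ 2147483648)
    (hb1 : -2147483648 ≤ b.1 ∧ b.1 ≤ 2147483648 ∧ -2147483648 ≤ b.2.2 ∧ b.2.2 ≤ 2147483648)
    (h : a.1 < b.1) : pyKey a < pyKey b := by
  unfold pyKey
  split_ifs <;> omega

-- key order on the sorted list
lemma pairwise_key (results : List (Int × Bool × Int)) :
    (pySortedResults results).Pairwise (fun a b => pyKey a ≤ pyKey b) := by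
  unfold pySortedResults; exact PySem.List.sorted_pairwise results pyKey

-- if the order indices are non-decreasing along the sorted list, B's raw pairwise condition holds
lemma raw_of_pairwise (results : List (Int × Bool × Int)) (hDom : Dom_verify_results results)
    (hO : (pySortedResults results).Pairwise (fun a b => a.2.2 ≤ b.2.2)) :
    ∀ x ∈ results, ∀ y ∈ results, x.1 < y.1 → x.2.2 ≤ y.2.2 := by
  intro x hx y hy hxy
  have hR : (pySortedResults results).Pairwise
      (fun a b => (pyKey a ≤ pyKey b ∧ a.2.2 ≤ b.2.2) ∨ (pyKey b ≤ pyKey a ∧ b.2.2 ≤ a.2.2)) :=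
    ((pairwise_key results).and hO).imp (fun h => Or.inl h)
  have hxs : x ∈ pySortedResults results := (mem_pySorted results x).mpr hx
  have hys : y ∈ pySortedResults results := (mem_pySorted results y).mpr hy
  have hne : x ≠ y := by intro h; rw [h] at hxy; omega
  have := hR.forall (fun {a b} h => h.symm) hxs hys hne
  rcases this with ⟨_, h⟩ | ⟨hk, _⟩
  · exact h
  · exact absurd hk (not_le.mpr
      (key_lt_of_fst_lt x y (domBounds results hDom x hx) (domBounds results hDom y hy) hxy))

-- converse: from B's raw condition (all valid), the order indices are non-decreasing along the sorted list
lemma pairwise_of_raw (results : List (Int × Bool × Int)) (hDom : Dom_verify_results results)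
    (hv : ∀ r ∈ results, r.2.1 = true)
    (hraw : ∀ x ∈ results, ∀ y ∈ results, x.1 < y.1 → x.2.2 ≤ y.2.2) :
    (pySortedResults results).Pairwise (fun a b => a.2.2 ≤ b.2.2) := by
  refine (pairwise_key results).imp_of_mem ?_
  intro a b ha hb hk
  have ha' := (mem_pySorted results a).mp ha
  have hb' := (mem_pySorted results b).mp hb
  rcases lt_trichotomy a.1 b.1 with h | h | h
  · exact hraw a ha' b hb' h
  · have hva := hv a ha'
    have hvb := hv b hb'
    unfold pyKey at hk
    rw [hva, hvb] at hk
    simp only [if_true] at hk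
    omega
  · exact absurd hk (not_le.mpr
      (key_lt_of_fst_lt b a (domBounds results hDom b hb') (domBounds results hDom a ha') h))

-- ===== VERDICT (by name: the statement is the Claim_ definition above) =====
theorem verify_results_spec : Claim_unchanged_verify_results := by
  intro results hDom
  unfold Spec_verify_results
  intro hD
  rw [verify_results, verifyLoopA_eq]
  cases hav : (pySortedResults results).all (fun r => r.2.1) with
  | false =>
      -- some triple is invalid: both sides are false
      simp only [Bool.false_and]
      symm
      rw [Bool.eq_false_iff]
      intro hb
      have hv' := ((alt_eq_true_iff results).mp hb).1
      have : (pySortedResults results).all (fun r => r.2.1) = true :=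
        List.all_eq_true.mpr (fun r hr => hv' r ((mem_pySorted results r).mp hr))
      rw [this] at hav
      exact absurd hav (by simp)
  | true =>
      have hv : ∀ r ∈ results, r.2.1 = true := fun r hr => by
        simpa using List.all_eq_true.mp hav r ((mem_pySorted results r).mpr hr)
      cases hzc : zipChain ((pySortedResults results).map (fun r => r.2.2)) with
      | false =>
          -- chain fails ⇒ raw pairwise condition fails ⇒ B false
          simp only [Bool.and_false, Bool.false_and]
          symm
          rw [Bool.eq_false_iff]
          intro hb
          have hraw := ((alt_eq_true_iff results).mp hb).2
          have hO := pairwise_of_raw results hDom hv hraw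
          rw [(zipChain_eq_pairwise _).mpr (List.pairwise_map.mpr hO)] at hzc
          simp at hzc
      | true =>
          -- chain holds ⇒ raw holds ⇒ B true; ¬D_ gives the head bound ⇒ A true
          have hO : (pySortedResults results).Pairwise (fun a b => a.2.2 ≤ b.2.2) :=
            List.pairwise_map.mp ((zipChain_eq_pairwise _).mp hzc)
          have hraw := raw_of_pairwise results hDom hO
          have hb : verify_results_alt results = true := (alt_eq_true_iff results).mpr ⟨hv, hraw⟩
          rw [hb]
          simp only [Bool.true_and, Bool.and_true]
          have hno : ¬ ∃ r ∈ results, r.2.2 < -1 := fun hex => hD ⟨hv, hraw, hex⟩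
          cases hsn : pySortedResults results with
          | nil => rfl
          | cons r t =>
              obtain ⟨i, v, o⟩ := r
              have hrm : ((i, v, o) : Int × Bool × Int) ∈ results :=
                (mem_pySorted results _).mp (hsn ▸ List.mem_cons_self)
              have : ¬ (o < -1) := fun h => hno ⟨(i, v, o), hrm, h⟩
              simp [headOk, show (-1 : Int) ≤ o by omega]

theorem verify_results_changed : Claim_changed_verify_results := by
  unfold Claim_changed_verify_results; decide

theorem verify_results_tight : Claim_exact_verify_results := by
  intro results hDom hD
  obtain ⟨hv, hraw, r0, hr0, hlt⟩ := hD
  rw [verify_results, verifyLoopA_eq,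
    (alt_eq_true_iff results).mpr ⟨hv, hraw⟩]
  have hav : (pySortedResults results).all (fun r => r.2.1) = true :=
    List.all_eq_true.mpr (fun r hr => by
      simpa using hv r ((mem_pySorted results r).mp hr))
  have hO := pairwise_of_raw results hDom hv hraw
  have hzc : zipChain ((pySortedResults results).map (fun r => r.2.2)) = true :=
    (zipChain_eq_pairwise _).mpr (List.pairwise_map.mpr hO)
  rw [hav, hzc]
  have hr0s : r0 ∈ pySortedResults results := (mem_pySorted results r0).mpr hr0
  cases hsn : pySortedResults results with
  | nil => rw [hsn] at hr0s; simp at hr0s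
  | cons x t =>
      obtain ⟨i, v, o⟩ := x
      rw [hsn] at hr0s hO
      have ho : o ≤ r0.2.2 := by
        rcases List.mem_cons.mp hr0s with rfl | hr0t
        · exact le_refl _
        · exact List.rel_of_pairwise_cons hO hr0t
      simp [headOk, show ¬ (-1 : Int) ≤ o by omega]
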